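-- pv_equiv track=rewrite | github.com/BalasubramanyamEvani/Neetcode-150 | 2158-amount-of-new-area-painted-each-day/2158-amount-of-new-area-painted-each-day.py | amountPainted
-- ===== SOURCE A (Python) =====
-- from typing import List
--
-- def amountPainted(paint: List[List[int]]) -> List[int]:
--     dp = {}
--     areas = []
--     for start, end in paint:
--         area = 0
--         index = start
--         while index < end:
--             eindex = dp.get(index, -1)
--             if eindex == -1:
--                 area += 1
--                 dp[index] = end - 1
--                 index += 1
--             else:
--                 dp[index] = max(eindex, end - 1)
--                 index = eindex + 1
--         areas.append(area)
--     return areas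
-- ===== SOURCE B (Python) =====
-- from typing import List
--
-- def amountPainted(paint: List[List[int]]) -> List[int]:
--     # Plain painted-cell set instead of A's jump-pointer dict: per day, count
--     # and add the not-yet-painted cells of range(start, end).
--     painted = set()
--     areas = []
--     for start, end in paint:
--         area = 0
--         for x in range(start, end):
--             if x not in painted:
--                 painted.add(x)
--                 area += 1
--         areas.append(area)
--     return areas
-- ===== Notes on version B (the rewrite author's own statement) =====
-- stated objective: simpler
-- what changed: A's jump-pointer dict (dp[k] = rightmost painted cell, with -1 as an absent-key sentinel and max/jump control flow) is replaced by a plain set of painted cells scanned cell by cell; Pre_ restricts to the problem's natural domain of length-2 intervals with nonnegative starts (the original problem guarantees 0 <= start < end).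
-- outside the precondition, e.g. on amountPainted([[1, 2, 3]]): A raises ValueError, B raises ValueError; on amountPainted([[-1, 0], [-1, 0]]): A returns [1, 1], B returns [1, 0]; on amountPainted([[-3, -1]]): A returns [2], B returns [2]
import Mathlib
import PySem

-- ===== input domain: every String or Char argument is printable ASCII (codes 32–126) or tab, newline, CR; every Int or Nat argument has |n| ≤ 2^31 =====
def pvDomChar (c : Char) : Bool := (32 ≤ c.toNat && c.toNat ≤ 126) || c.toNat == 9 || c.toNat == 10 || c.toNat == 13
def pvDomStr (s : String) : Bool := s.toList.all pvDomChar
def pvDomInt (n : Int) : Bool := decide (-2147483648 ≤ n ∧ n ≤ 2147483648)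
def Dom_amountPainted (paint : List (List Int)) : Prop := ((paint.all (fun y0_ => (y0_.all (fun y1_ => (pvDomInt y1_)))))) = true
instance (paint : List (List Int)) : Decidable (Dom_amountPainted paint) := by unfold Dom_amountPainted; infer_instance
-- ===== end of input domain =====

-- B replaces A's jump-pointer dict (with its -1 absent-key sentinel) by a plain set of
-- painted cells; Pre_ below restricts to the problem's natural domain of nonnegative
-- paint positions (the original problem guarantees 0 <= start < end).

-- ===== PORT A =====
-- the 'while index < end' loop; fuel = (end - index).toNat suffices because on states A
-- reaches, dp maps every key k to a value ≥ k, so index strictly increases each turn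
def amountPaintedLoop (fuel : Nat) (endd index area : Int) (dp : Std.HashMap Int Int) :
    Int × Std.HashMap Int Int :=
  match fuel with
  | 0 => (area, dp)
  | f + 1 =>
    if index < endd then
      let eindex := dp.getD index (-1)
      if eindex = -1 then
        amountPaintedLoop f endd (index + 1) (area + 1) (dp.insert index (endd - 1))
      else
        amountPaintedLoop f endd (eindex + 1) area (dp.insert index (max eindex (endd - 1)))
    else (area, dp)

def amountPaintedStep (st : List Int × Std.HashMap Int Int) (iv : List Int) :
    List Int × Std.HashMap Int Int :=
  match iv with
  | [start, endd] =>
      let r := amountPaintedLoop (endd - start).toNat endd start 0 st.2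
      (st.1 ++ [r.1], r.2)
  | _ => st  -- 'for start, end in paint' raises on other shapes; outside Pre_

def amountPainted (paint : List (List Int)) : List Int :=
  (paint.foldl amountPaintedStep ([], (∅ : Std.HashMap Int Int))).1

-- ===== PORT B =====
def amountPaintedAltDay (st : Int × Std.HashSet Int) (x : Int) : Int × Std.HashSet Int :=
  if x ∈ st.2 then st else (st.1 + 1, st.2.insert x)

def amountPaintedAltStep (st : List Int × Std.HashSet Int) (iv : List Int) :
    List Int × Std.HashSet Int :=
  match iv with
  | [start, endd] =>
      let r := (PySem.List.pyRange start endd 1).foldl amountPaintedAltDay (0, st.2)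
      (st.1 ++ [r.1], r.2)
  | _ => st  -- 'for start, end in paint' raises on other shapes; outside Pre_

def amountPainted_alt (paint : List (List Int)) : List Int :=
  (paint.foldl amountPaintedAltStep ([], (∅ : Std.HashSet Int))).1

-- ===== PRECONDITION & SPEC =====
-- Pre_ excludes (a) inner lists whose length is not 2, on which the unpacking
-- 'for start, end in paint' raises ValueError in A and in B alike, and (b) intervals
-- with a negative start, outside the problem's natural domain of nonnegative paint
-- positions (the original problem guarantees 0 <= start < end); there A's absent-key
-- sentinel -1 can collide with stored jump values and A re-counts painted cells.
def Pre_amountPainted (paint : List (List Int)) : Prop :=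
  ∀ iv ∈ paint, iv.length = 2 ∧ 0 ≤ iv.headD 0
instance (paint : List (List Int)) : Decidable (Pre_amountPainted paint) := by
  unfold Pre_amountPainted; infer_instance
def pvWitness_amountPainted : List (List Int) := [[0, 2], [1, 3]]

def Spec_amountPainted (paint : List (List Int)) (out : List Int) : Prop :=
  out = amountPainted_alt paint
instance (paint : List (List Int)) (out : List Int) : Decidable (Spec_amountPainted paint out) := by
  unfold Spec_amountPainted; infer_instance

-- ===== CLAIM (what is proved, stated in full; the proofs are below) =====
def Claim_equal_amountPainted : Prop :=
  ∀ (paint : List (List Int)), Dom_amountPainted paint → Pre_amountPainted paint →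
    Spec_amountPainted paint (amountPainted paint)

-- ===== LEMMAS AND PROOFS =====

-- start / end of an interval (proof-side shorthands)
def ivS (iv : List Int) : Int := iv.headD 0
def ivE (iv : List Int) : Int := (iv.drop 1).headD 0

-- k is painted after the first j days
def pvPainted (paint : List (List Int)) (j : Nat) (k : Int) : Prop :=
  ∃ m, m < j ∧ ivS (paint.getD m []) ≤ k ∧ k < ivE (paint.getD m [])

-- the between-days invariant tying A's dict to B's set
def pvInv (paint : List (List Int)) (j : Nat) (dp : Std.HashMap Int Int) (S : Std.HashSet Int) :
    Prop :=
  (∀ k : Int, (dp[k]?).isSome = true ↔ k ∈ S) ∧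
  (∀ k : Int, k ∈ S ↔ pvPainted paint j k) ∧
  (∀ k v : Int, dp[k]? = some v → k ≤ v ∧ ∀ x, k ≤ x → x ≤ v → (dp[x]?).isSome = true) ∧
  (∀ k : Int, dp[k]? = some (-1) →
    ∃ i, i < j ∧ ivS (paint.getD i []) ≤ k ∧ k < ivE (paint.getD i []) ∧
      ivE (paint.getD i []) = 0)

-- lookup after insert / membership after insert, phrased the way the proofs below use them
theorem pvHMget (m : Std.HashMap Int Int) {k : Int} {v : Int} (a : Int) :
    (m.insert k v)[a]? = if a = k then some v else m[a]? := by
  rw [Std.HashMap.getElem?_insert]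
  by_cases h : a = k
  · simp [h]
  · have h' : (k == a) = false := by
      simp only [beq_eq_false_iff_ne, ne_eq]
      exact fun hh => h hh.symm
    simp [h, h']

theorem pvHSmem {s : Std.HashSet Int} {x k : Int} : k ∈ s.insert x ↔ k ∈ s ∨ k = x := by
  rw [Std.HashSet.mem_insert]
  constructor
  · rintro (h | h)
    · simp only [beq_iff_eq] at h
      exact Or.inr h.symm
    · exact Or.inl h
  · rintro (h | h)
    · exact Or.inr h
    · exact Or.inl (by simp [h])

theorem pvRange_nil {a b : Int} (h : b ≤ a) : PySem.List.pyRange a b 1 = [] := by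
  rw [PySem.List.pyRange_one]
  have : (b - a).toNat = 0 := by omega
  simp [this]

theorem pvFold_noop (S : Std.HashSet Int) (a : Int) (l : List Int) (h : ∀ x ∈ l, x ∈ S) :
    l.foldl amountPaintedAltDay (a, S) = (a, S) := by
  induction l with
  | nil => rfl
  | cons x t ih =>
    simp only [List.foldl_cons, amountPaintedAltDay, h x (by simp), if_pos]
    exact ih (fun y hy => h y (by simp [hy]))

-- the inner 'while' loop of A against B's fold over range(start, end)
theorem pvInner (fuel : Nat) :
    ∀ (e index area areaB : Int) (dp : Std.HashMap Int Int) (S : Std.HashSet Int),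
    (e - index).toNat ≤ fuel →
    (∀ k, (dp[k]?).isSome = true ↔ k ∈ S) →
    (∀ k v, index ≤ k → dp[k]? = some v →
      k ≤ v ∧ ∀ x, k ≤ x → x ≤ v → (dp[x]?).isSome = true) →
    (∀ k, index ≤ k → k < e → dp[k]? ≠ some (-1)) →
    ∃ N dp' S',
      amountPaintedLoop fuel e index area dp = (area + N, dp') ∧
      (PySem.List.pyRange index e 1).foldl amountPaintedAltDay (areaB, S) = (areaB + N, S') ∧
      (∀ k, (dp'[k]?).isSome = true ↔ k ∈ S') ∧
      (∀ k, k ∈ S' ↔ (k ∈ S ∨ (index ≤ k ∧ k < e))) ∧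
      (∀ k v, dp'[k]? = some v → dp[k]? = some v ∨
        (index ≤ k ∧ k < e ∧ ((dp[k]? = none ∧ v = e - 1) ∨
          (∃ v0, dp[k]? = some v0 ∧ v = max v0 (e - 1))))) := by
  induction fuel with
  | zero =>
    intro e index area areaB dp S hf hrel _ _
    have he : e ≤ index := by omega
    refine ⟨0, dp, S, by simp [amountPaintedLoop], ?_, hrel, ?_, fun k v h => Or.inl h⟩
    · rw [pvRange_nil he]; simp
    · intro k
      constructor
      · exact fun h => Or.inl h
      · rintro (h | ⟨h1, h2⟩)
        · exact h
        · omega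
  | succ f ih =>
    intro e index area areaB dp S hf hrel hI2 hnb
    by_cases hlt : index < e
    · cases hgi : dp[index]? with
      | none =>
        -- fresh cell: both sides paint it
        have hgd : dp.getD index (-1) = -1 := by rw [Std.HashMap.getD_eq_getD_getElem?, hgi]; rfl
        have hnotS : index ∉ S := by
          intro hmem
          have := (hrel index).2 hmem
          simp [hgi] at this
        have hrel' : ∀ k, (((dp.insert index (e - 1))[k]?).isSome = true) ↔
            k ∈ S.insert index := by
          intro k
          rw [pvHMget, pvHSmem]
          by_cases hk : k = index
          · simp [hk]
          · rw [if_neg hk]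
            simp only [hk, or_false]
            exact hrel k
        have hI2' : ∀ k v, index + 1 ≤ k → (dp.insert index (e - 1))[k]? = some v →
            k ≤ v ∧ ∀ x, k ≤ x → x ≤ v → (((dp.insert index (e - 1))[x]?).isSome = true) := by
          intro k v hk hkv
          rw [pvHMget, if_neg (by omega)] at hkv
          obtain ⟨h1, h2⟩ := hI2 k v (by omega) hkv
          refine ⟨h1, fun x hx1 hx2 => ?_⟩
          rw [pvHMget]
          by_cases hxi : x = index
          · simp [hxi]
          · simp only [if_neg hxi]; exact h2 x hx1 hx2
        have hnb' : ∀ k, index + 1 ≤ k → k < e → (dp.insert index (e - 1))[k]? ≠ some (-1) := by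
          intro k hk hke
          rw [pvHMget, if_neg (by omega)]
          exact hnb k (by omega) hke
        obtain ⟨N, dp', S', hA, hB, hre, hSmem, hnew⟩ :=
          ih e (index + 1) (area + 1) (areaB + 1) (dp.insert index (e - 1))
            (S.insert index) (by omega) hrel' hI2' hnb'
        refine ⟨N + 1, dp', S', ?_, ?_, hre, ?_, ?_⟩
        · have : amountPaintedLoop (f + 1) e index area dp =
              amountPaintedLoop f e (index + 1) (area + 1) (dp.insert index (e - 1)) := by
            simp [amountPaintedLoop, hlt, hgd]
          rw [this, hA]
          exact congrArg (fun z => (z, dp')) (by omega : area + 1 + N = area + (N + 1))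
        · rw [PySem.List.pyRange_one_cons hlt, List.foldl_cons]
          have hstep : amountPaintedAltDay (areaB, S) index =
              (areaB + 1, S.insert index) := by
            simp [amountPaintedAltDay, hnotS]
          rw [hstep, hB]
          exact congrArg (fun z => (z, S')) (by omega : areaB + 1 + N = areaB + (N + 1))
        · intro k
          rw [hSmem k, pvHSmem]
          constructor
          · rintro ((h | h) | ⟨h1, h2⟩)
            · exact Or.inl h
            · exact Or.inr ⟨by omega, by omega⟩
            · exact Or.inr ⟨by omega, h2⟩
          · rintro (h | ⟨h1, h2⟩)
            · exact Or.inl (Or.inl h)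
            · by_cases hk : k = index
              · exact Or.inl (Or.inr hk)
              · exact Or.inr ⟨by omega, h2⟩
        · intro k v h
          rcases hnew k v h with h1 | ⟨hk1, hk2, h2⟩
          · rw [pvHMget] at h1
            by_cases hk : k = index
            · rw [if_pos hk] at h1
              refine Or.inr ⟨by omega, by omega, Or.inl ⟨by rw [hk]; exact hgi, ?_⟩⟩
              exact Option.some.inj h1.symm
            · rw [if_neg hk] at h1
              exact Or.inl h1
          · have hk : k ≠ index := by omega
            rw [pvHMget, if_neg hk] at h2
            exact Or.inr ⟨by omega, hk2, h2⟩
      | some v0 =>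
        -- painted cell: A jumps over the run [index, v0]; B walks it without changes
        have hne : v0 ≠ -1 := by
          intro hv
          exact hnb index le_rfl hlt (by rw [hgi, hv])
        have hgd : dp.getD index (-1) = v0 := by rw [Std.HashMap.getD_eq_getD_getElem?, hgi]; rfl
        obtain ⟨hle, hcov⟩ := hI2 index v0 le_rfl hgi
        have hrel' : ∀ k, (((dp.insert index (max v0 (e - 1)))[k]?).isSome = true) ↔
            k ∈ S := by
          intro k
          rw [pvHMget]
          by_cases hk : k = index
          · subst hk
            have : k ∈ S := (hrel k).1 (by simp [hgi])
            simp [this]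
          · simp only [if_neg hk]; exact hrel k
        have hI2' : ∀ k v, v0 + 1 ≤ k → (dp.insert index (max v0 (e - 1)))[k]? = some v →
            k ≤ v ∧ ∀ x, k ≤ x → x ≤ v →
              (((dp.insert index (max v0 (e - 1)))[x]?).isSome = true) := by
          intro k v hk hkv
          rw [pvHMget, if_neg (by omega)] at hkv
          obtain ⟨h1, h2⟩ := hI2 k v (by omega) hkv
          refine ⟨h1, fun x hx1 hx2 => ?_⟩
          rw [pvHMget]
          by_cases hxi : x = index
          · simp [hxi]
          · simp only [if_neg hxi]; exact h2 x hx1 hx2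
        have hnb' : ∀ k, v0 + 1 ≤ k → k < e →
            (dp.insert index (max v0 (e - 1)))[k]? ≠ some (-1) := by
          intro k hk hke
          rw [pvHMget, if_neg (by omega)]
          exact hnb k (by omega) hke
        obtain ⟨N, dp', S', hA, hB, hre, hSmem, hnew⟩ :=
          ih e (v0 + 1) area areaB (dp.insert index (max v0 (e - 1))) S
            (by omega) hrel' hI2' hnb'
        have hm1 : index ≤ min (v0 + 1) e := by omega
        have hm2 : min (v0 + 1) e ≤ e := by omega
        have hnoop : (PySem.List.pyRange index (min (v0 + 1) e)).foldl amountPaintedAltDay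
            (areaB, S) = (areaB, S) := by
          apply pvFold_noop
          intro x hx
          rw [PySem.List.mem_pyRange_one] at hx
          exact (hrel x).1 (hcov x hx.1 (by omega))
        have htail : PySem.List.pyRange (min (v0 + 1) e) e = PySem.List.pyRange (v0 + 1) e := by
          by_cases hc : v0 + 1 ≤ e
          · rw [min_eq_left hc]
          · rw [pvRange_nil (by omega), pvRange_nil (by omega)]
        refine ⟨N, dp', S', ?_, ?_, hre, ?_, ?_⟩
        · have : amountPaintedLoop (f + 1) e index area dp =
              amountPaintedLoop f e (v0 + 1) area (dp.insert index (max v0 (e - 1))) := by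
            simp [amountPaintedLoop, hlt, hgd, hne]
          rw [this, hA]
        · rw [PySem.List.pyRange_one_append index (min (v0 + 1) e) e hm1 hm2,
            List.foldl_append, hnoop, htail, hB]
        · intro k
          rw [hSmem k]
          constructor
          · rintro (h | ⟨h1, h2⟩)
            · exact Or.inl h
            · exact Or.inr ⟨by omega, h2⟩
          · rintro (h | ⟨h1, h2⟩)
            · exact Or.inl h
            · by_cases hk : k ≤ v0
              · exact Or.inl ((hrel k).1 (hcov k h1 hk))
              · exact Or.inr ⟨by omega, h2⟩
        · intro k v h
          rcases hnew k v h with h1 | ⟨hk1, hk2, h2⟩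
          · rw [pvHMget] at h1
            by_cases hk : k = index
            · rw [if_pos hk] at h1
              refine Or.inr ⟨by omega, by omega, Or.inr ⟨v0, by rw [hk]; exact hgi, ?_⟩⟩
              exact (Option.some.inj h1).symm
            · rw [if_neg hk] at h1
              exact Or.inl h1
          · have hk : k ≠ index := by omega
            rw [pvHMget, if_neg hk] at h2
            rcases h2 with ⟨hn, hv⟩ | ⟨w, hw, hv⟩
            · exact Or.inr ⟨by omega, hk2, Or.inl ⟨hn, hv⟩⟩
            · exact Or.inr ⟨by omega, hk2, Or.inr ⟨w, hw, hv⟩⟩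
    · -- index ≥ e: loop over, empty range
      have he : e ≤ index := by omega
      refine ⟨0, dp, S, by simp [amountPaintedLoop, hlt], ?_, hrel, ?_, fun k v h => Or.inl h⟩
      · rw [pvRange_nil he]; simp
      · intro k
        constructor
        · exact fun h => Or.inl h
        · rintro (h | ⟨h1, h2⟩)
          · exact h
          · omega

-- one day: the invariant survives and both sides append the same area
theorem pvDay (paint : List (List Int)) (j : Nat) (s e : Int)
    (dp : Std.HashMap Int Int) (S : Std.HashSet Int)
    (hj : j < paint.length) (hiv : paint.getD j [] = [s, e])
    (hpos : ∀ iv ∈ paint, 0 ≤ ivS iv) (hinv : pvInv paint j dp S) :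
    ∃ N dp' S',
      amountPaintedLoop (e - s).toNat e s 0 dp = (N, dp') ∧
      (PySem.List.pyRange s e 1).foldl amountPaintedAltDay (0, S) = (N, S') ∧
      pvInv paint (j + 1) dp' S' := by
  obtain ⟨hrel, hS, hI2, hI4⟩ := hinv
  have hsE : ivS (paint.getD j []) = s := by rw [hiv]; rfl
  have heE : ivE (paint.getD j []) = e := by rw [hiv]; rfl
  -- with nonnegative starts every painted cell is ≥ 0, while a stored -1 would force
  -- its key ≤ -1: A never sees the stored value -1 inside the day's range
  have hnb : ∀ k, s ≤ k → k < e → dp[k]? ≠ some (-1) := by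
    intro k hk1 hk2 hgk
    obtain ⟨i, hij, hc1, hc2, hc0⟩ := hI4 k hgk
    have hkneg : k ≤ -1 := by
      have := (hI2 k (-1) hgk).1; omega
    have hmem : paint.getD i [] ∈ paint := by
      have hi : i < paint.length := by omega
      rw [List.getD_eq_getElem?_getD, List.getElem?_eq_getElem hi]
      exact List.getElem_mem hi
    have := hpos _ hmem
    omega
  obtain ⟨N, dp', S', hA, hB, hrel', hSmem, hnew⟩ :=
    pvInner (e - s).toNat e s 0 0 dp S le_rfl hrel (fun k v _ h => hI2 k v h) hnb
  have hmono : ∀ x : Int, (dp[x]?).isSome = true → (dp'[x]?).isSome = true := by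
    intro x hx
    exact (hrel' x).2 ((hSmem x).2 (Or.inl ((hrel x).1 hx)))
  refine ⟨N, dp', S', by simpa using hA, by simpa using hB, hrel', ?_, ?_, ?_⟩
  · -- S' is the painted set after j + 1 days
    intro k
    rw [hSmem k, hS k]
    constructor
    · rintro (⟨m, hm, hc⟩ | ⟨h1, h2⟩)
      · exact ⟨m, by omega, hc⟩
      · exact ⟨j, by omega, by omega, by omega⟩
    · rintro ⟨m, hm, hc1, hc2⟩
      by_cases hmj : m < j
      · exact Or.inl ⟨m, hmj, hc1, hc2⟩
      · have : m = j := by omega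
        subst this
        exact Or.inr ⟨by omega, by omega⟩
  · -- runs: every key covers an interval of keys
    intro k v hkv
    rcases hnew k v hkv with hold | ⟨hk1, hk2, hcase⟩
    · obtain ⟨h1, h2⟩ := hI2 k v hold
      exact ⟨h1, fun x hx1 hx2 => hmono x (h2 x hx1 hx2)⟩
    · have hxrange : ∀ x, s ≤ x → x < e → (dp'[x]?).isSome = true := by
        intro x hx1 hx2
        exact (hrel' x).2 ((hSmem x).2 (Or.inr ⟨hx1, hx2⟩))
      rcases hcase with ⟨hn, rfl⟩ | ⟨v0, hv0, rfl⟩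
      · exact ⟨by omega, fun x hx1 hx2 => hxrange x (by omega) (by omega)⟩
      · obtain ⟨h1, h2⟩ := hI2 k v0 hv0
        refine ⟨le_max_of_le_left h1, fun x hx1 hx2 => ?_⟩
        by_cases hxv : x ≤ v0
        · exact hmono x (h2 x hx1 hxv)
        · have : x ≤ e - 1 := by
            rcases max_cases v0 (e - 1) with ⟨hm, _⟩ | ⟨hm, _⟩ <;> omega
          exact hxrange x (by omega) (by omega)
  · -- value -1 comes from an interval ending exactly at 0
    intro k hkv
    rcases hnew k (-1) hkv with hold | ⟨hk1, hk2, hcase⟩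
    · obtain ⟨i, hij, h⟩ := hI4 k hold
      exact ⟨i, by omega, h⟩
    · have he0 : e = 0 := by
        rcases hcase with ⟨hn, hv⟩ | ⟨v0, hv0, hv⟩
        · omega
        · have hv0ne : v0 ≠ -1 := fun h => hnb k hk1 hk2 (h ▸ hv0)
          rcases max_cases v0 (e - 1) with ⟨hm, hm2⟩ | ⟨hm, hm2⟩ <;> omega
      exact ⟨j, by omega, by omega, by omega, by omega⟩

theorem pvOuter (rest : List (List Int)) :
    ∀ (paint : List (List Int)) (j : Nat) (dp : Std.HashMap Int Int) (S : Std.HashSet Int)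
      (acc : List Int),
    paint.drop j = rest →
    (∀ iv ∈ paint, iv.length = 2) →
    (∀ iv ∈ paint, 0 ≤ ivS iv) →
    pvInv paint j dp S →
    (rest.foldl amountPaintedStep (acc, dp)).1 = (rest.foldl amountPaintedAltStep (acc, S)).1 := by
  induction rest with
  | nil => intro paint j dp S acc _ _ _ _; rfl
  | cons iv rest' ih =>
    intro paint j dp S acc hdrop hpre hpos hinv
    have hjlen : j < paint.length := by
      by_contra h
      rw [List.drop_eq_nil_of_le (by omega)] at hdrop
      exact List.cons_ne_nil _ _ hdrop.symm
    have hsome : paint[j]? = some iv := by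
      have h0 : (paint.drop j)[0]? = some iv := by rw [hdrop]; rfl
      rwa [List.getElem?_drop, Nat.add_zero] at h0
    have hget : paint.getD j [] = iv := by
      rw [List.getD_eq_getElem?_getD, hsome]; rfl
    have hlen2 : iv.length = 2 := hpre iv (List.mem_of_getElem? hsome)
    rcases iv with _ | ⟨s, iv'⟩
    · simp at hlen2
    rcases iv' with _ | ⟨e, iv''⟩
    · simp at hlen2
    rcases iv'' with _ | ⟨x, t⟩
    swap
    · simp at hlen2
    obtain ⟨N, dp', S', hA, hB, hinv'⟩ := pvDay paint j s e dp S hjlen hget hpos hinv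
    have hdrop' : paint.drop (j + 1) = rest' := by
      rw [← List.tail_drop, hdrop]; rfl
    have hstepA : amountPaintedStep (acc, dp) [s, e] = (acc ++ [N], dp') := by
      simp only [amountPaintedStep, hA]
    have hstepB : amountPaintedAltStep (acc, S) [s, e] = (acc ++ [N], S') := by
      simp only [amountPaintedAltStep, hB]
    rw [List.foldl_cons, List.foldl_cons, hstepA, hstepB]
    exact ih paint (j + 1) dp' S' (acc ++ [N]) hdrop' hpre hpos hinv'

-- ===== VERDICT (by name: the statement is the Claim_ definition above) =====
theorem amountPainted_spec : Claim_equal_amountPainted := by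
  intro paint _ hpre
  have h0 : pvInv paint 0 (∅ : Std.HashMap Int Int) (∅ : Std.HashSet Int) := by
    refine ⟨fun k => by simp, fun k => by simp [pvPainted],
      fun k v h => by simp at h, fun k h => by simp at h⟩
  have := pvOuter paint paint 0 (∅ : Std.HashMap Int Int) (∅ : Std.HashSet Int) [] rfl
    (fun iv h => (hpre iv h).1)
    (fun iv h => by have := (hpre iv h).2; cases iv <;> exact this) h0
  simpa [Spec_amountPainted, amountPainted, amountPainted_alt] using this
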